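-- pv_equiv track=rewrite | github.com/tevansuk/aoc-2021 | aoc/seventeen.py | find_x_steps
-- ===== SOURCE A (Python) =====
-- from collections import defaultdict
--
-- TargetSteps = defaultdict[int, set[int]]
--
-- XAnyStep = set[int]
--
-- def tri(n: int) -> int:
--     return (n * (n + 1)) // 2
--
-- def find_x_steps(xmin: int, xmax: int) -> tuple[TargetSteps, XAnyStep]:
--     x_steps = TargetSteps(set)
--     x_any_step = XAnyStep()
--     for xspeed in range(xmax + 1):
--         max_x = tri(xspeed)
--         if max_x < xmin:
--             continue
--         if max_x <= xmax:
--             x_any_step.add(xspeed)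
--         cx = max_x
--         for step in range(xspeed):
--             cx -= step
--             if xmin <= cx <= xmax:
--                 x_steps[xspeed - step].add(xspeed)
--             elif cx < xmin:
--                 break
--     return x_steps, x_any_step
-- ===== SOURCE B (Python) =====
-- from collections import defaultdict
--
--
-- def tri(n):
--     return (n * (n + 1)) // 2
--
--
-- def _max_k(lo, hi, bound):
--     # largest k in [lo, hi] with tri(k) <= bound (lo - 1 when none; hi when hi < lo)
--     while lo <= hi:
--         mid = (lo + hi) // 2
--         if tri(mid) <= bound:
--             lo = mid + 1
--         else:
--             hi = mid - 1
--     return hi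
--
--
-- def find_x_steps(xmin, xmax):
--     x_steps = defaultdict(set)
--     for xspeed in range(xmax + 1):
--         t = tri(xspeed)
--         if t < xmin:
--             continue
--         # positions after (xspeed - k) steps are t - tri(k), decreasing in k;
--         # binary-search the contiguous k-range landing inside [xmin, xmax]
--         k_hi = _max_k(0, xspeed - 1, t - xmin)
--         k_lo = _max_k(0, xspeed - 1, t - xmax - 1) + 1
--         for k in range(k_lo, k_hi + 1):
--             x_steps[xspeed - k].add(xspeed)
--     # speeds whose final resting x lies in [xmin, xmax]: a contiguous range
--     v_lo = _max_k(0, xmax, xmin - 1) + 1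
--     v_hi = _max_k(0, xmax, xmax)
--     x_any_step = set(range(v_lo, v_hi + 1))
--     return x_steps, x_any_step
-- ===== Notes on version B (the rewrite author's own statement) =====
-- stated objective: faster
-- what changed: Instead of scanning positions step-by-step from the apex down (including the whole above-window prefix) for every xspeed, B binary-searches the contiguous step range whose position lands in [xmin,xmax] (positions are monotone in the step count) and emits exactly that range; the final-resting-speed set is likewise computed as one binary-searched interval instead of being accumulated in the loop.
import Mathlib
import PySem

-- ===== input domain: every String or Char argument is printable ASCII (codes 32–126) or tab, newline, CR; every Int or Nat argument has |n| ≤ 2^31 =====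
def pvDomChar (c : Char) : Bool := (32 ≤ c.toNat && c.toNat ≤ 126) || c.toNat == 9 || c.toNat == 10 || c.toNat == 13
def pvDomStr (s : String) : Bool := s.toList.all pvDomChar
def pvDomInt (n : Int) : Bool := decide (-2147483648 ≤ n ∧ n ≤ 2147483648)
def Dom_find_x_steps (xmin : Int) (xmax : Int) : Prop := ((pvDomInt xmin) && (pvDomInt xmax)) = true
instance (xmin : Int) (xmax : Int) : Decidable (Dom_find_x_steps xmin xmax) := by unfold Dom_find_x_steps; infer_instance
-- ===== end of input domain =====

-- B replaces A's per-xspeed above-window scan-with-break by a binary search for the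
-- contiguous step interval landing in [xmin, xmax] (objective: faster, asymptotically).

-- ===== PORT A =====
def triP (n : Int) : Int := PySem.Int.floordiv (n * (n + 1)) 2

-- inner 'for step in range(xspeed)' loop of A, with its early 'break'
def innerA (xmin xmax xspeed : Int) : Int → PySem.Dict Int (PySem.Set Int) → List Int → PySem.Dict Int (PySem.Set Int)
  | _, d, [] => d
  | cx, d, s :: rest =>
    let cx' := cx - s
    if xmin ≤ cx' ∧ cx' ≤ xmax then
      innerA xmin xmax xspeed cx' (d.modify (xspeed - s) PySem.Set.empty (fun t => PySem.Set.add t xspeed)) rest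
    else if cx' < xmin then d
    else innerA xmin xmax xspeed cx' d rest

def stepA (xmin xmax : Int) (d : PySem.Dict Int (PySem.Set Int)) (v : Int) : PySem.Dict Int (PySem.Set Int) :=
  let T := triP v
  if T < xmin then d else innerA xmin xmax v T d (PySem.List.pyRange 0 v 1)

def anyStepA (xmin xmax : Int) (s : PySem.Set Int) (v : Int) : PySem.Set Int :=
  let T := triP v
  if T < xmin then s else if T ≤ xmax then PySem.Set.add s v else s

def find_x_steps (xmin : Int) (xmax : Int) : (List (Int × List Int)) × List Int :=
  let st := (PySem.List.pyRange 0 (xmax + 1) 1).foldl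
    (fun st v => (stepA xmin xmax st.1 v, anyStepA xmin xmax st.2 v))
    (PySem.Dict.empty, PySem.Set.empty)
  (st.1.items, st.2)

-- ===== PORT B =====
-- largest k in [lo, hi] with triP k ≤ bound (lo - 1 when none; hi when hi < lo)
def maxK (lo hi bound : Int) : Int :=
  if h : lo ≤ hi then
    let mid := PySem.Int.floordiv (lo + hi) 2
    if triP mid ≤ bound then maxK (mid + 1) hi bound else maxK lo (mid - 1) bound
  else hi
termination_by (hi + 1 - lo).toNat
decreasing_by
  · have := PySem.Int.floordiv_two_mid_bounds h; omega
  · have := PySem.Int.floordiv_two_mid_bounds h; omega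

def stepB (xmin xmax : Int) (d : PySem.Dict Int (PySem.Set Int)) (v : Int) : PySem.Dict Int (PySem.Set Int) :=
  let T := triP v
  if T < xmin then d
  else
    let khi := maxK 0 (v - 1) (T - xmin)
    let klo := maxK 0 (v - 1) (T - xmax - 1) + 1
    (PySem.List.pyRange klo (khi + 1) 1).foldl
      (fun d k => d.modify (v - k) PySem.Set.empty (fun t => PySem.Set.add t v)) d

def find_x_steps_alt (xmin : Int) (xmax : Int) : (List (Int × List Int)) × List Int :=
  let d := (PySem.List.pyRange 0 (xmax + 1) 1).foldl (stepB xmin xmax) PySem.Dict.empty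
  let vlo := maxK 0 xmax (xmin - 1) + 1
  let vhi := maxK 0 xmax xmax
  (d.items, PySem.Set.ofList (PySem.List.pyRange vlo (vhi + 1) 1))

-- ===== PRECONDITION & SPEC =====
def Spec_find_x_steps (xmin : Int) (xmax : Int) (out : (List (Int × List Int)) × List Int) : Prop := out = find_x_steps_alt xmin xmax
instance (xmin : Int) (xmax : Int) (out : (List (Int × List Int)) × List Int) : Decidable (Spec_find_x_steps xmin xmax out) := by unfold Spec_find_x_steps; infer_instance

-- ===== CLAIM (what is proved, stated in full; the proofs are below) =====
def Claim_equal_find_x_steps : Prop := ∀ (xmin : Int) (xmax : Int), Dom_find_x_steps xmin xmax → Spec_find_x_steps xmin xmax (find_x_steps xmin xmax)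

-- ===== LEMMAS AND PROOFS =====

theorem tri_two (n : Int) : 2 * triP n = n * (n + 1) := by
  have hdvd : (2 : Int) ∣ n * (n + 1) := (Int.even_mul_succ_self n).two_dvd
  have := PySem.Int.floordiv_eq_ediv_of_pos (a := n * (n + 1)) (b := 2) (by norm_num)
  simp only [triP, this]
  exact Int.mul_ediv_cancel' hdvd

theorem tri_mono {k k' : Int} (h0 : 0 ≤ k) (h : k ≤ k') : triP k ≤ triP k' := by
  have h2 : k * (k + 1) ≤ k' * (k' + 1) := by nlinarith
  have := tri_two k; have := tri_two k'; omega

theorem tri_succ {j : Int} (_h : 0 ≤ j) : triP j = triP (j - 1) + j := by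
  have h1 := tri_two j
  have h2 := tri_two (j - 1)
  nlinarith

theorem tri_neg_one : triP (-1) = 0 := by decide

theorem maxK_spec (lo hi bound : Int) (hlo : 0 ≤ lo) (hlh : lo - 1 ≤ hi) :
    lo - 1 ≤ maxK lo hi bound ∧ maxK lo hi bound ≤ hi ∧
    (lo ≤ maxK lo hi bound → triP (maxK lo hi bound) ≤ bound) ∧
    (maxK lo hi bound < hi → bound < triP (maxK lo hi bound + 1)) := by
  revert hlo hlh
  fun_induction maxK lo hi bound with
  | case1 lo hi hlohi mid hmid ih =>
      intro hlo hlh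
      obtain ⟨hm1, hm2⟩ := PySem.Int.floordiv_two_mid_bounds hlohi
      obtain ⟨i1, i2, i3, i4⟩ := ih (by omega) (by omega)
      refine ⟨by omega, i2, ?_, i4⟩
      intro _
      by_cases hr : mid + 1 ≤ maxK (mid + 1) hi bound
      · exact i3 hr
      · have he : maxK (mid + 1) hi bound = mid := by omega
        rw [he]; exact hmid
  | case2 lo hi hlohi mid hmid ih =>
      intro hlo hlh
      obtain ⟨hm1, hm2⟩ := PySem.Int.floordiv_two_mid_bounds hlohi
      obtain ⟨i1, i2, i3, i4⟩ := ih (by omega) (by omega)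
      refine ⟨i1, by omega, i3, ?_⟩
      intro _
      by_cases hr : maxK lo (mid - 1) bound < mid - 1
      · exact i4 hr
      · have he : maxK lo (mid - 1) bound = mid - 1 := by omega
        have h5 : mid - 1 + 1 = mid := by omega
        rw [he, h5]; omega
  | case3 lo hi hnle =>
      intro hlo hlh
      exact ⟨hlh, le_refl hi, fun hc => absurd (by omega : lo ≤ hi) hnle,
        fun hc => absurd hc (lt_irrefl hi)⟩

/-- on [lo, hi], `triP k ≤ bound ↔ k ≤ maxK lo hi bound` -/
theorem maxK_iff (lo hi bound k : Int) (hlo : 0 ≤ lo) (hlh : lo - 1 ≤ hi)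
    (hk1 : lo ≤ k) (hk2 : k ≤ hi) : triP k ≤ bound ↔ k ≤ maxK lo hi bound := by
  obtain ⟨h1, h2, h3, h4⟩ := maxK_spec lo hi bound hlo hlh
  constructor
  · intro hb
    by_contra hgt
    have hlt : maxK lo hi bound < hi := by omega
    have := h4 hlt
    have : triP (maxK lo hi bound + 1) ≤ triP k := tri_mono (by omega) (by omega)
    omega
  · intro hle
    have := h3 (by omega)
    have : triP k ≤ triP (maxK lo hi bound) := tri_mono (by omega) hle
    omega

theorem pyRange_one_nil {a b : Int} (h : b ≤ a) : PySem.List.pyRange a b 1 = [] := by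
  simp [PySem.List.pyRange_one]; omega

theorem filter_pyRange_eq (P : Int → Prop) [DecidablePred P] (a b lo hi : Int)
    (ha : a ≤ lo) (hb : hi < b) (hP : ∀ k, a ≤ k → k < b → (P k ↔ lo ≤ k ∧ k ≤ hi)) :
    (PySem.List.pyRange a b 1).filter (fun k => decide (P k)) = PySem.List.pyRange lo (hi + 1) 1 := by
  generalize hn : (b - a).toNat = n
  induction n generalizing a lo with
  | zero =>
      rw [pyRange_one_nil (by omega : b ≤ a), pyRange_one_nil (by omega : hi + 1 ≤ lo)]
      simp
  | succ n ih =>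
      have hab : a < b := by omega
      by_cases hal : a < lo
      · have hPa : ¬ P a := by
          rw [hP a le_rfl hab]; omega
        rw [PySem.List.pyRange_one_cons hab, List.filter_cons_of_neg (by simpa using hPa)]
        exact ih (a + 1) lo (by omega) (fun k hk1 hk2 => hP k (by omega) hk2) (by omega)
      · have hae : a = lo := by omega
        subst hae
        by_cases hah : a ≤ hi
        · have hPa : P a := (hP a le_rfl hab).mpr ⟨le_rfl, hah⟩
          rw [PySem.List.pyRange_one_cons hab, List.filter_cons_of_pos (by simpa using hPa),
            PySem.List.pyRange_one_cons (by omega : a < hi + 1)]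
          congr 1
          refine ih (a + 1) (a + 1) le_rfl ?_ (by omega)
          intro k hk1 hk2
          rw [hP k (by omega) hk2]; omega
        · rw [pyRange_one_nil (by omega : hi + 1 ≤ a)]
          apply List.filter_eq_nil_iff.mpr
          intro k hk
          have hk' : a ≤ k ∧ k < b := by
            rw [PySem.List.mem_pyRange_one] at hk; omega
          simp only [decide_eq_true_eq]
          intro hPk
          have := (hP k hk'.1 hk'.2).mp hPk
          omega

theorem innerA_eq (xmin xmax v : Int) (_hv : 0 ≤ v) (j : Int) (d : PySem.Dict Int (PySem.Set Int))
    (hj0 : 0 ≤ j) (hjv : j ≤ v) :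
    innerA xmin xmax v (triP v - triP (j - 1)) d (PySem.List.pyRange j v 1)
      = ((PySem.List.pyRange j v 1).filter
          (fun k => decide (xmin ≤ triP v - triP k ∧ triP v - triP k ≤ xmax))).foldl
          (fun d k => d.modify (v - k) PySem.Set.empty (fun t => PySem.Set.add t v)) d := by
  generalize hn : (v - j).toNat = n
  induction n generalizing j d with
  | zero =>
      rw [pyRange_one_nil (by omega : v ≤ j)]
      simp [innerA]
  | succ n ih =>
      have hjv' : j < v := by omega
      have hcx : triP v - triP (j - 1) - j = triP v - triP j := by
        have := tri_succ hj0; omega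
      rw [PySem.List.pyRange_one_cons hjv']
      simp only [innerA]
      rw [hcx]
      split_ifs with h1 h2
      · rw [List.filter_cons_of_pos (by simpa using h1)]
        simp only [List.foldl_cons]
        have := ih (j + 1) (PySem.Dict.modify d (v - j) PySem.Set.empty (fun t => PySem.Set.add t v))
          (by omega) (by omega) (by omega)
        simpa using this
      · symm
        have hempty : (PySem.List.pyRange j v 1).filter
            (fun k => decide (xmin ≤ triP v - triP k ∧ triP v - triP k ≤ xmax)) = [] := by
          apply List.filter_eq_nil_iff.mpr
          intro k hk
          rw [PySem.List.mem_pyRange_one] at hk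
          have hmono : triP j ≤ triP k := tri_mono hj0 (by omega)
          simp only [decide_eq_true_eq]
          omega
        rw [← PySem.List.pyRange_one_cons hjv', hempty]
        simp
      · rw [List.filter_cons_of_neg (by simpa using h1)]
        have := ih (j + 1) d (by omega) (by omega) (by omega)
        simpa using this

theorem foldl_set_add_fresh (l : List Int) (s : PySem.Set Int)
    (hnd : l.Nodup) (hfresh : ∀ x ∈ l, x ∉ s) :
    l.foldl PySem.Set.add s = s ++ l := by
  induction l generalizing s with
  | nil => simp
  | cons x t ih =>
    have hx : PySem.Set.add s x = s ++ [x] := by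
      simp [PySem.Set.add, PySem.Set.contains, hfresh x (by simp)]
    simp only [List.foldl_cons, hx]
    simp only [List.nodup_cons] at hnd
    have hfr : ∀ y ∈ t, y ∉ s ++ [x] := by
      intro y hy
      simp only [List.mem_append, List.mem_singleton]
      rintro (hs | rfl)
      · exact hfresh y (by simp [hy]) hs
      · exact hnd.1 hy
    rw [ih (s ++ [x]) hnd.2 hfr]
    simp

theorem stepAB (xmin xmax v : Int) (h0 : 0 ≤ v) (d : PySem.Dict Int (PySem.Set Int)) :
    stepA xmin xmax d v = stepB xmin xmax d v := by
  unfold stepA stepB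
  by_cases hT : triP v < xmin
  · simp [hT]
  · simp only [if_neg hT]
    have h1 := innerA_eq xmin xmax v h0 0 d le_rfl h0
    simp only [show (0 : Int) - 1 = -1 from by norm_num, tri_neg_one, sub_zero] at h1
    rw [h1]
    obtain ⟨a1, a2, a3, a4⟩ := maxK_spec 0 (v - 1) (triP v - xmin) le_rfl (by omega)
    obtain ⟨b1, b2, b3, b4⟩ := maxK_spec 0 (v - 1) (triP v - xmax - 1) le_rfl (by omega)
    rw [filter_pyRange_eq (fun k => xmin ≤ triP v - triP k ∧ triP v - triP k ≤ xmax) 0 v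
      (maxK 0 (v - 1) (triP v - xmax - 1) + 1) (maxK 0 (v - 1) (triP v - xmin))
      (by omega) (by omega) ?_]
    intro k hk0 hkv
    have iff1 := maxK_iff 0 (v - 1) (triP v - xmin) k le_rfl (by omega) hk0 (by omega)
    have iff2 := maxK_iff 0 (v - 1) (triP v - xmax - 1) k le_rfl (by omega) hk0 (by omega)
    omega

theorem main_eq (xmin xmax : Int) : find_x_steps xmin xmax = find_x_steps_alt xmin xmax := by
  by_cases hx : xmax < 0
  · have hm : ∀ bnd, maxK 0 xmax bnd = xmax := by
      intro bnd; rw [maxK, dif_neg (by omega : ¬ (0 : Int) ≤ xmax)]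
    simp only [find_x_steps, find_x_steps_alt]
    rw [pyRange_one_nil (by omega : xmax + 1 ≤ 0)]
    simp only [List.foldl_nil, hm]
    rw [pyRange_one_nil (le_refl (xmax + 1))]
    rfl
  · simp only [find_x_steps, find_x_steps_alt]
    rw [PySem.List.foldl_prod_mk (f := stepA xmin xmax) (g := anyStepA xmin xmax)]
    have hdict : (PySem.List.pyRange 0 (xmax + 1) 1).foldl (stepA xmin xmax) PySem.Dict.empty
        = (PySem.List.pyRange 0 (xmax + 1) 1).foldl (stepB xmin xmax) PySem.Dict.empty := by
      apply PySem.List.foldl_congr_mem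
      intro acc w hw
      rw [PySem.List.mem_pyRange_one] at hw
      exact stepAB xmin xmax w hw.1 acc
    have hany : (PySem.List.pyRange 0 (xmax + 1) 1).foldl (anyStepA xmin xmax) PySem.Set.empty
        = PySem.Set.ofList (PySem.List.pyRange (maxK 0 xmax (xmin - 1) + 1) (maxK 0 xmax xmax + 1) 1) := by
      have hcongr : (PySem.List.pyRange 0 (xmax + 1) 1).foldl (anyStepA xmin xmax) PySem.Set.empty
          = (PySem.List.pyRange 0 (xmax + 1) 1).foldl
              (fun s w => if xmin ≤ triP w ∧ triP w ≤ xmax then PySem.Set.add s w else s)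
              PySem.Set.empty := by
        apply PySem.List.foldl_congr_mem
        intro acc w _
        simp only [anyStepA]
        by_cases hlt : triP w < xmin
        · rw [if_pos hlt, if_neg (by omega : ¬ (xmin ≤ triP w ∧ triP w ≤ xmax))]
        · rw [if_neg hlt]
          by_cases hle : triP w ≤ xmax
          · rw [if_pos hle, if_pos (by omega : xmin ≤ triP w ∧ triP w ≤ xmax)]
          · rw [if_neg hle, if_neg (by omega : ¬ (xmin ≤ triP w ∧ triP w ≤ xmax))]
      rw [hcongr, PySem.List.foldl_ite_eq_foldl_filter
        (fun w => xmin ≤ triP w ∧ triP w ≤ xmax) PySem.Set.add]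
      rw [foldl_set_add_fresh _ _ ((PySem.List.nodup_pyRange_one 0 (xmax + 1)).filter _)
        (by intro y hy h; simp [PySem.Set.empty] at h)]
      rw [filter_pyRange_eq (fun w => xmin ≤ triP w ∧ triP w ≤ xmax) 0 (xmax + 1)
        (maxK 0 xmax (xmin - 1) + 1) (maxK 0 xmax xmax) ?hlo ?hhi ?hchar]
      case hchar =>
        intro w hw0 hw1
        have iff1 := maxK_iff 0 xmax xmax w le_rfl (by omega) hw0 (by omega)
        have iff2 := maxK_iff 0 xmax (xmin - 1) w le_rfl (by omega) hw0 (by omega)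
        omega
      case hlo =>
        obtain ⟨b1, _, _, _⟩ := maxK_spec 0 xmax (xmin - 1) le_rfl (by omega)
        omega
      case hhi =>
        obtain ⟨_, a2, _, _⟩ := maxK_spec 0 xmax xmax le_rfl (by omega)
        omega
      rw [PySem.Set.ofList_eq_foldl, foldl_set_add_fresh _ _
        (PySem.List.nodup_pyRange_one _ _) (by intro y hy h; simp at h)]
      simp
    rw [hdict, hany]

-- ===== VERDICT (by name: the statement is the Claim_ definition above) =====
theorem find_x_steps_spec : Claim_equal_find_x_steps := by
  intro xmin xmax _
  unfold Spec_find_x_steps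
  exact main_eq xmin xmax
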